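-- pv_equiv track=rewrite | github.com/jostan30/ai-resume-builder-backend | models/ai_generator.py | _get_fallback_skills
-- ===== SOURCE A (Python) =====
-- def _get_fallback_skills(job_title):
--     """Provide fallback skills based on job title"""
--     job_lower = job_title.lower()
--
--     if any(term in job_lower for term in ["software", "developer", "engineer", "programming", "coder"]):
--         return ["Problem Solving", "JavaScript", "Python", "SQL", "Git",
--                "Communication", "Agile Methodologies", "APIs", "Testing", "Data Structures"]
--
--     elif any(term in job_lower for term in ["design", "designer", "ui", "ux", "graphic"]):
--         return ["Adobe Creative Suite", "UI/UX Design", "Typography", "Wireframing",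
--                "Visual Communication", "Color Theory", "Figma", "User Research",
--                "Prototyping", "Branding"]
--
--     elif any(term in job_lower for term in ["data", "analyst", "scientist", "analytics"]):
--         return ["SQL", "Python", "Data Visualization", "Statistical Analysis",
--                "Excel", "Machine Learning", "R", "Data Cleaning",
--                "Critical Thinking", "Problem Solving"]
--
--     elif any(term in job_lower for term in ["manager", "management", "director", "lead"]):
--         return ["Leadership", "Strategic Planning", "Team Management", "Communication",
--                "Problem Solving", "Decision Making", "Time Management",
--                "Project Management", "Negotiation", "Delegation"]
--
--     else:
--         # Generic professional skills
--         return ["Communication", "Problem Solving", "Team Collaboration",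
--                f"{job_title} expertise", "Time Management", "Project Management",
--                "Analytical Thinking", "Adaptability", "Interpersonal Skills", "Leadership"]
-- ===== SOURCE B (Python) =====
-- # B: flat keyword->category map; collect ALL matching category indices in one pass
-- # and pick the highest-priority one with min() -- no ordered cascade, no short-circuit.
--
-- _KEYWORD_CATEGORY = {
--     "software": 0, "developer": 0, "engineer": 0, "programming": 0, "coder": 0,
--     "design": 1, "designer": 1, "ui": 1, "ux": 1, "graphic": 1,
--     "data": 2, "analyst": 2, "scientist": 2, "analytics": 2,
--     "manager": 3, "management": 3, "director": 3, "lead": 3,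
-- }
--
-- _SKILLS = [
--     ["Problem Solving", "JavaScript", "Python", "SQL", "Git",
--      "Communication", "Agile Methodologies", "APIs", "Testing", "Data Structures"],
--     ["Adobe Creative Suite", "UI/UX Design", "Typography", "Wireframing",
--      "Visual Communication", "Color Theory", "Figma", "User Research",
--      "Prototyping", "Branding"],
--     ["SQL", "Python", "Data Visualization", "Statistical Analysis",
--      "Excel", "Machine Learning", "R", "Data Cleaning",
--      "Critical Thinking", "Problem Solving"],
--     ["Leadership", "Strategic Planning", "Team Management", "Communication",
--      "Problem Solving", "Decision Making", "Time Management",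
--      "Project Management", "Negotiation", "Delegation"],
-- ]
--
-- def _get_fallback_skills(job_title):
--     job_lower = job_title.lower()
--     matched = [cat for kw, cat in _KEYWORD_CATEGORY.items() if kw in job_lower]
--     if matched:
--         return _SKILLS[min(matched)]
--     return ["Communication", "Problem Solving", "Team Collaboration",
--             f"{job_title} expertise", "Time Management", "Project Management",
--             "Analytical Thinking", "Adaptability", "Interpersonal Skills", "Leadership"]
-- ===== Notes on version B (the rewrite author's own statement) =====
-- stated objective: alternative
-- what changed: Replaces the short-circuiting if/elif cascade with a single flat pass over a keyword-to-category map that collects all matching category indices and then selects the winning category with min(), indexing into a skills array; the default list is the no-match case.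
import Mathlib
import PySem

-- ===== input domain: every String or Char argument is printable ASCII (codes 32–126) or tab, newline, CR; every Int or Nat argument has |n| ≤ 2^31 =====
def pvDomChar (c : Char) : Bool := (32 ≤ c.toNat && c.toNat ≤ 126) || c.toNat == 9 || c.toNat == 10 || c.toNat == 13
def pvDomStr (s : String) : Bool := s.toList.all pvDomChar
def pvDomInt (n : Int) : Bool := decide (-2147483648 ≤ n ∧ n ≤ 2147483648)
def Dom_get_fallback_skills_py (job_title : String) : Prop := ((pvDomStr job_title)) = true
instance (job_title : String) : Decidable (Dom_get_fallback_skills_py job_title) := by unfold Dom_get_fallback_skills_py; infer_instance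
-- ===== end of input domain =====

-- B replaces A's short-circuiting if/elif cascade by a flat keyword→category map: one pass
-- collects every matching category index, min() picks the winner (alternative; same cost).

-- ===== PORT A =====
def get_fallback_skills_py (job_title : String) : List String :=
  let job_lower := PySem.Str.lower job_title
  if ["software", "developer", "engineer", "programming", "coder"].any
      (fun term => PySem.Str.isIn term job_lower) then
    ["Problem Solving", "JavaScript", "Python", "SQL", "Git",
     "Communication", "Agile Methodologies", "APIs", "Testing", "Data Structures"]
  else if ["design", "designer", "ui", "ux", "graphic"].any
      (fun term => PySem.Str.isIn term job_lower) then
    ["Adobe Creative Suite", "UI/UX Design", "Typography", "Wireframing",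
     "Visual Communication", "Color Theory", "Figma", "User Research",
     "Prototyping", "Branding"]
  else if ["data", "analyst", "scientist", "analytics"].any
      (fun term => PySem.Str.isIn term job_lower) then
    ["SQL", "Python", "Data Visualization", "Statistical Analysis",
     "Excel", "Machine Learning", "R", "Data Cleaning",
     "Critical Thinking", "Problem Solving"]
  else if ["manager", "management", "director", "lead"].any
      (fun term => PySem.Str.isIn term job_lower) then
    ["Leadership", "Strategic Planning", "Team Management", "Communication",
     "Problem Solving", "Decision Making", "Time Management",
     "Project Management", "Negotiation", "Delegation"]
  else
    ["Communication", "Problem Solving", "Team Collaboration",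
     job_title ++ " expertise", "Time Management", "Project Management",
     "Analytical Thinking", "Adaptability", "Interpersonal Skills", "Leadership"]

-- ===== PORT B =====
-- the flat keyword → category-index map of Source B (dict in insertion order)
def pvKeywordCategory : List (String × Nat) :=
  [("software", 0), ("developer", 0), ("engineer", 0), ("programming", 0), ("coder", 0),
   ("design", 1), ("designer", 1), ("ui", 1), ("ux", 1), ("graphic", 1),
   ("data", 2), ("analyst", 2), ("scientist", 2), ("analytics", 2),
   ("manager", 3), ("management", 3), ("director", 3), ("lead", 3)]

-- the skills array of Source B, indexed by category
def pvSkills : List (List String) :=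
  [["Problem Solving", "JavaScript", "Python", "SQL", "Git",
    "Communication", "Agile Methodologies", "APIs", "Testing", "Data Structures"],
   ["Adobe Creative Suite", "UI/UX Design", "Typography", "Wireframing",
    "Visual Communication", "Color Theory", "Figma", "User Research",
    "Prototyping", "Branding"],
   ["SQL", "Python", "Data Visualization", "Statistical Analysis",
    "Excel", "Machine Learning", "R", "Data Cleaning",
    "Critical Thinking", "Problem Solving"],
   ["Leadership", "Strategic Planning", "Team Management", "Communication",
    "Problem Solving", "Decision Making", "Time Management",
    "Project Management", "Negotiation", "Delegation"]]

def get_fallback_skills_py_alt (job_title : String) : List String :=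
  let job_lower := PySem.Str.lower job_title
  let matched := (pvKeywordCategory.filter
      (fun p => PySem.Str.isIn p.1 job_lower)).map Prod.snd
  match matched.min? with
  | some i => pvSkills.getD i []
  | none =>
      ["Communication", "Problem Solving", "Team Collaboration",
       job_title ++ " expertise", "Time Management", "Project Management",
       "Analytical Thinking", "Adaptability", "Interpersonal Skills", "Leadership"]

-- ===== PRECONDITION & SPEC =====
def Spec_get_fallback_skills_py (job_title : String) (out : List String) : Prop := out = get_fallback_skills_py_alt job_title
instance (job_title : String) (out : List String) : Decidable (Spec_get_fallback_skills_py job_title out) := by unfold Spec_get_fallback_skills_py; infer_instance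

-- ===== CLAIM (what is proved, stated in full; the proofs are below) =====
def Claim_equal_get_fallback_skills_py : Prop := ∀ (job_title : String), Dom_get_fallback_skills_py job_title → Spec_get_fallback_skills_py job_title (get_fallback_skills_py job_title)

-- ===== LEMMAS AND PROOFS =====

-- membership in B's matched list, as an explicit disjunction over the 18 keywords
theorem pv_mem_matched (jl : String) (i : Nat) :
    i ∈ ((pvKeywordCategory.filter
        (fun p => PySem.Str.isIn p.1 jl)).map Prod.snd) ↔
      (PySem.Str.isIn "software" jl ∨ PySem.Str.isIn "developer" jl ∨
       PySem.Str.isIn "engineer" jl ∨ PySem.Str.isIn "programming" jl ∨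
       PySem.Str.isIn "coder" jl) ∧ i = 0 ∨
      (PySem.Str.isIn "design" jl ∨ PySem.Str.isIn "designer" jl ∨
       PySem.Str.isIn "ui" jl ∨ PySem.Str.isIn "ux" jl ∨
       PySem.Str.isIn "graphic" jl) ∧ i = 1 ∨
      (PySem.Str.isIn "data" jl ∨ PySem.Str.isIn "analyst" jl ∨
       PySem.Str.isIn "scientist" jl ∨ PySem.Str.isIn "analytics" jl) ∧ i = 2 ∨
      (PySem.Str.isIn "manager" jl ∨ PySem.Str.isIn "management" jl ∨
       PySem.Str.isIn "director" jl ∨ PySem.Str.isIn "lead" jl) ∧ i = 3 := by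
  simp only [List.mem_map, List.mem_filter, pvKeywordCategory, List.mem_cons,
    List.not_mem_nil, or_false]
  constructor
  · rintro ⟨a, ⟨(rfl|rfl|rfl|rfl|rfl|rfl|rfl|rfl|rfl|rfl|rfl|rfl|rfl|rfl|rfl|rfl|rfl|rfl), hin⟩, rfl⟩ <;>
      simp at hin ⊢ <;> tauto
  · rintro (⟨h,rfl⟩|⟨h,rfl⟩|⟨h,rfl⟩|⟨h,rfl⟩)
    · rcases h with h|h|h|h|h
      · exact ⟨("software",0), ⟨by tauto, h⟩, rfl⟩
      · exact ⟨("developer",0), ⟨by tauto, h⟩, rfl⟩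
      · exact ⟨("engineer",0), ⟨by tauto, h⟩, rfl⟩
      · exact ⟨("programming",0), ⟨by tauto, h⟩, rfl⟩
      · exact ⟨("coder",0), ⟨by tauto, h⟩, rfl⟩
    · rcases h with h|h|h|h|h
      · exact ⟨("design",1), ⟨by tauto, h⟩, rfl⟩
      · exact ⟨("designer",1), ⟨by tauto, h⟩, rfl⟩
      · exact ⟨("ui",1), ⟨by tauto, h⟩, rfl⟩
      · exact ⟨("ux",1), ⟨by tauto, h⟩, rfl⟩
      · exact ⟨("graphic",1), ⟨by tauto, h⟩, rfl⟩
    · rcases h with h|h|h|h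
      · exact ⟨("data",2), ⟨by tauto, h⟩, rfl⟩
      · exact ⟨("analyst",2), ⟨by tauto, h⟩, rfl⟩
      · exact ⟨("scientist",2), ⟨by tauto, h⟩, rfl⟩
      · exact ⟨("analytics",2), ⟨by tauto, h⟩, rfl⟩
    · rcases h with h|h|h|h
      · exact ⟨("manager",3), ⟨by tauto, h⟩, rfl⟩
      · exact ⟨("management",3), ⟨by tauto, h⟩, rfl⟩
      · exact ⟨("director",3), ⟨by tauto, h⟩, rfl⟩
      · exact ⟨("lead",3), ⟨by tauto, h⟩, rfl⟩

theorem pv_min_matched (jl : String) :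
    ((pvKeywordCategory.filter
        (fun p => PySem.Str.isIn p.1 jl)).map Prod.snd).min? =
      (if ["software", "developer", "engineer", "programming", "coder"].any
          (fun term => PySem.Str.isIn term jl) then some 0
       else if ["design", "designer", "ui", "ux", "graphic"].any
          (fun term => PySem.Str.isIn term jl) then some 1
       else if ["data", "analyst", "scientist", "analytics"].any
          (fun term => PySem.Str.isIn term jl) then some 2
       else if ["manager", "management", "director", "lead"].any
          (fun term => PySem.Str.isIn term jl) then some 3
       else none) := by
  split_ifs with h0 h1 h2 h3
  · simp only [List.any_cons, List.any_nil, Bool.or_eq_true, Bool.false_eq_true, or_false] at h0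
    rw [List.min?_eq_some_iff]
    exact ⟨(pv_mem_matched jl 0).mpr (Or.inl ⟨h0, rfl⟩), fun b _ => Nat.zero_le b⟩
  · simp only [List.any_cons, List.any_nil, Bool.or_eq_true, Bool.false_eq_true, or_false] at h0 h1
    push Not at h0
    obtain ⟨n0, n1, n2, n3, n4⟩ := h0
    rw [List.min?_eq_some_iff]
    refine ⟨(pv_mem_matched jl 1).mpr (Or.inr (Or.inl ⟨h1, rfl⟩)), ?_⟩
    intro b hb
    rcases (pv_mem_matched jl b).mp hb with ⟨hk, rfl⟩ | ⟨_, rfl⟩ | ⟨_, rfl⟩ | ⟨_, rfl⟩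
    · rcases hk with h|h|h|h|h
      exacts [absurd h n0, absurd h n1, absurd h n2, absurd h n3, absurd h n4]
    all_goals omega
  · simp only [List.any_cons, List.any_nil, Bool.or_eq_true, Bool.false_eq_true, or_false] at h0 h1 h2
    push Not at h0 h1
    obtain ⟨n0, n1, n2, n3, n4⟩ := h0
    obtain ⟨m0, m1, m2, m3, m4⟩ := h1
    rw [List.min?_eq_some_iff]
    refine ⟨(pv_mem_matched jl 2).mpr (Or.inr (Or.inr (Or.inl ⟨h2, rfl⟩))), ?_⟩
    intro b hb
    rcases (pv_mem_matched jl b).mp hb with ⟨hk, rfl⟩ | ⟨hk, rfl⟩ | ⟨_, rfl⟩ | ⟨_, rfl⟩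
    · rcases hk with h|h|h|h|h
      exacts [absurd h n0, absurd h n1, absurd h n2, absurd h n3, absurd h n4]
    · rcases hk with h|h|h|h|h
      exacts [absurd h m0, absurd h m1, absurd h m2, absurd h m3, absurd h m4]
    all_goals omega
  · simp only [List.any_cons, List.any_nil, Bool.or_eq_true, Bool.false_eq_true, or_false] at h0 h1 h2 h3
    push Not at h0 h1 h2
    obtain ⟨n0, n1, n2, n3, n4⟩ := h0
    obtain ⟨m0, m1, m2, m3, m4⟩ := h1
    obtain ⟨k0, k1, k2, k3⟩ := h2
    rw [List.min?_eq_some_iff]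
    refine ⟨(pv_mem_matched jl 3).mpr (Or.inr (Or.inr (Or.inr ⟨h3, rfl⟩))), ?_⟩
    intro b hb
    rcases (pv_mem_matched jl b).mp hb with ⟨hk, rfl⟩ | ⟨hk, rfl⟩ | ⟨hk, rfl⟩ | ⟨_, rfl⟩
    · rcases hk with h|h|h|h|h
      exacts [absurd h n0, absurd h n1, absurd h n2, absurd h n3, absurd h n4]
    · rcases hk with h|h|h|h|h
      exacts [absurd h m0, absurd h m1, absurd h m2, absurd h m3, absurd h m4]
    · rcases hk with h|h|h|h
      exacts [absurd h k0, absurd h k1, absurd h k2, absurd h k3]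
    all_goals omega
  · simp only [List.any_cons, List.any_nil, Bool.or_eq_true, Bool.false_eq_true, or_false] at h0 h1 h2 h3
    push Not at h0 h1 h2 h3
    obtain ⟨n0, n1, n2, n3, n4⟩ := h0
    obtain ⟨m0, m1, m2, m3, m4⟩ := h1
    obtain ⟨k0, k1, k2, k3⟩ := h2
    obtain ⟨l0, l1, l2, l3⟩ := h3
    rw [List.min?_eq_none_iff, List.eq_nil_iff_forall_not_mem]
    intro b hb
    rcases (pv_mem_matched jl b).mp hb with ⟨hk, _⟩ | ⟨hk, _⟩ | ⟨hk, _⟩ | ⟨hk, _⟩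
    · rcases hk with h|h|h|h|h
      exacts [absurd h n0, absurd h n1, absurd h n2, absurd h n3, absurd h n4]
    · rcases hk with h|h|h|h|h
      exacts [absurd h m0, absurd h m1, absurd h m2, absurd h m3, absurd h m4]
    · rcases hk with h|h|h|h
      exacts [absurd h k0, absurd h k1, absurd h k2, absurd h k3]
    · rcases hk with h|h|h|h
      exacts [absurd h l0, absurd h l1, absurd h l2, absurd h l3]

-- ===== VERDICT (by name: the statement is the Claim_ definition above) =====
theorem get_fallback_skills_py_spec : Claim_equal_get_fallback_skills_py := by
  intro job_title _
  unfold Spec_get_fallback_skills_py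
  simp only [get_fallback_skills_py, get_fallback_skills_py_alt]
  rw [pv_min_matched]
  split_ifs <;> rfl
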